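-- pv_equiv track=rewrite | github.com/caadams4/Cryptogam-Algorithm-Problem | main.py | hashWord
-- ===== SOURCE A (Python) =====
-- def hashWord(word):
--
--   known_letters = []
--   hash_val = 0
--   out_going_hash = []
--   string = ''
--
--   for letter in word:
--     if letter not in known_letters:
--       known_letters.append(letter)
--       hash_val += 1
--       out_going_hash.append(str(hash_val))
--     else:
--       out_going_hash.append(str(known_letters.index(letter) + 1))
--
--   return string.join(out_going_hash)
-- ===== SOURCE B (Python) =====
-- def hashWord(word):
--   val = {c: len(set(word[:word.index(c) + 1])) for c in set(word)}
--   return ''.join(str(val[c]) for c in word)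
-- ===== Notes on version B (the rewrite author's own statement) =====
-- stated objective: alternative
-- what changed: A runs one stateful discovery loop (known-letters list, counter, look-back with list.index); B uses a stateless closed formula instead: a letter's number is len(set(word[:word.index(c)+1])), the count of distinct letters in the prefix ending at its first occurrence, precomputed once per distinct letter and then applied.
import Mathlib
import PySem

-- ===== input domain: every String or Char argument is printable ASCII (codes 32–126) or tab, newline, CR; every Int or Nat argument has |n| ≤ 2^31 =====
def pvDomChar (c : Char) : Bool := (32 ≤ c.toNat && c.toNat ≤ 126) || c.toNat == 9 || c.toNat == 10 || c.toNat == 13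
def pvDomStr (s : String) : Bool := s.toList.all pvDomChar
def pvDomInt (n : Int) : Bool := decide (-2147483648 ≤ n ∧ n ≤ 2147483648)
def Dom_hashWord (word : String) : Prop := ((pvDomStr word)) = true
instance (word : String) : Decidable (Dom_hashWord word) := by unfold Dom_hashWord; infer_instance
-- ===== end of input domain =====

-- B replaces A's stateful discovery loop by a stateless closed formula: each letter's number is the count of distinct letters in the prefix ending at its first occurrence, precomputed per distinct letter; proved equal to A.


-- ===== PORT A =====
-- one loop body of A: state (known_letters, hash_val, out_going_hash)
def hwStepA (st : List Char × Int × List String) (letter : Char) : List Char × Int × List String :=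
  if letter ∉ st.1 then
    (st.1 ++ [letter], st.2.1 + 1, st.2.2 ++ [PySem.Int.toStr (st.2.1 + 1)])
  else
    (st.1, st.2.1, st.2.2 ++ [PySem.Int.toStr (((PySem.List.index? st.1 letter).getD 0 : Int) + 1)])

def hashWord (word : String) : String :=
  PySem.Str.join "" (word.toList.foldl hwStepA ([], 0, [])).2.2

-- ===== PORT B =====
-- len(set(word[:word.index(c) + 1])): word.index(c) always succeeds here (c is drawn from word), so the total getD 0 is exact
def hwVal (wl : List Char) (c : Char) : Int :=
  ((PySem.Set.ofList (PySem.List.slice wl none (some ((((PySem.List.index? wl c).getD 0 : Nat) : Int) + 1)))).length : Int)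

-- val[c] in the output pass always hits a key (every letter of word is in set(word)), so getD 0 is exact
def hashWord_alt (word : String) : String :=
  PySem.Str.join "" (word.toList.map (fun c => PySem.Int.toStr
    (((PySem.Set.ofList word.toList).foldl
        (fun d x => d.insert x (hwVal word.toList x)) PySem.Dict.empty).getD c 0)))

-- ===== PRECONDITION & SPEC =====
def Spec_hashWord (word : String) (out : String) : Prop := out = hashWord_alt word
instance (word : String) (out : String) : Decidable (Spec_hashWord word out) := by unfold Spec_hashWord; infer_instance

-- ===== CLAIM (what is proved, stated in full; the proofs are below) =====
def Claim_equal_hashWord : Prop := ∀ (word : String), Dom_hashWord word → Spec_hashWord word (hashWord word)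

-- ===== LEMMAS AND PROOFS =====

-- folding Set.add only appends
lemma hw_foldl_add_append (s : List Char) : ∀ (acc : PySem.Set Char), ∃ r, s.foldl PySem.Set.add acc = acc ++ r := by
  induction s with
  | nil => intro acc; exact ⟨[], by simp⟩
  | cons x s ih =>
    intro acc
    simp only [List.foldl_cons]
    obtain ⟨r, hr⟩ := ih (PySem.Set.add acc x)
    by_cases hx : x ∈ acc
    · have ha : PySem.Set.add acc x = acc := by simp [PySem.Set.add, hx]
      exact ⟨r, by rw [hr, ha]⟩
    · have ha : PySem.Set.add acc x = acc ++ [x] := by simp [PySem.Set.add, hx]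
      exact ⟨[x] ++ r, by rw [hr, ha, List.append_assoc]⟩

lemma hw_ofList_append (q s : List Char) : ∃ r, PySem.Set.ofList (q ++ s) = PySem.Set.ofList q ++ r := by
  have h1 : PySem.Set.ofList (q ++ s) = s.foldl PySem.Set.add (PySem.Set.ofList q) := by
    simp [PySem.Set.ofList_eq_foldl, List.foldl_append]
  obtain ⟨r, hr⟩ := hw_foldl_add_append s (PySem.Set.ofList q)
  exact ⟨r, by rw [h1, hr]⟩

lemma hw_ofList_snoc {q : List Char} (c : Char) :
    PySem.Set.ofList (q ++ [c]) = PySem.Set.add (PySem.Set.ofList q) c := by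
  rw [PySem.Set.ofList_eq_foldl, PySem.Set.ofList_eq_foldl, List.foldl_append]
  rfl

lemma hw_ofList_snoc_not_mem {q : List Char} {c : Char} (h : c ∉ q) :
    PySem.Set.ofList (q ++ [c]) = PySem.Set.ofList q ++ [c] := by
  have hm : c ∉ PySem.Set.ofList q := by
    rw [PySem.Set.mem_ofList]; exact h
  rw [hw_ofList_snoc]; simp [PySem.Set.add, hm]

lemma hw_ofList_snoc_mem {q : List Char} {c : Char} (h : c ∈ q) :
    PySem.Set.ofList (q ++ [c]) = PySem.Set.ofList q := by
  have hm : c ∈ PySem.Set.ofList q := by rw [PySem.Set.mem_ofList]; exact h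
  rw [hw_ofList_snoc]; simp [PySem.Set.add, hm]

-- the number of c in the first-occurrence list of the whole word, from its first-occurrence decomposition
lemma hw_idx_fo {pre : List Char} {c : Char} (suf : List Char) (h : c ∉ pre) :
    PySem.List.index? (PySem.Set.ofList (pre ++ c :: suf)) c = some (PySem.Set.ofList pre).length := by
  have hdec : pre ++ c :: suf = (pre ++ [c]) ++ suf := by simp
  obtain ⟨r, hr⟩ := hw_ofList_append (pre ++ [c]) suf
  rw [hdec, hr, hw_ofList_snoc_not_mem h]
  have hmem : c ∈ PySem.Set.ofList pre ++ [c] := by simp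
  rw [PySem.List.index?_append_of_mem r hmem]
  have hnm : c ∉ PySem.Set.ofList pre := by rw [PySem.Set.mem_ofList]; exact h
  exact PySem.List.index?_append_singleton_self _ c hnm

-- the same index when c already occurred in a prefix p of the word
lemma hw_idx_fo_of_mem {p : List Char} {c : Char} (s : List Char) (h : c ∈ PySem.Set.ofList p) :
    PySem.List.index? (PySem.Set.ofList (p ++ s)) c = PySem.List.index? (PySem.Set.ofList p) c := by
  obtain ⟨r, hr⟩ := hw_ofList_append p s
  rw [hr, PySem.List.index?_append_of_mem r h]

-- B's closed formula computes exactly "index of c in the first-occurrence list, plus one"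
lemma hw_val_eq {wl : List Char} {c : Char} (h : c ∈ wl) :
    hwVal wl c = ((PySem.List.index? (PySem.Set.ofList wl) c).getD 0 : Int) + 1 := by
  have hs : (PySem.List.index? wl c).isSome := (PySem.List.index?_isSome_iff wl c).mpr h
  rcases hj : PySem.List.index? wl c with _ | j
  · rw [hj] at hs; simp at hs
  obtain ⟨pre, suf, hsplit, hlen, hpre⟩ := (PySem.List.index?_eq_some_iff wl c j).mp hj
  subst hsplit
  unfold hwVal
  rw [hj]
  have hcast : ((((some j).getD 0 : Nat) : Int) + 1) = (((j + 1 : Nat) : Int)) := by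
    simp
  rw [hcast, PySem.List.slice_to_natCast]
  have htake : (pre ++ c :: suf).take (j + 1) = pre ++ [c] := by
    subst hlen
    rw [show (c :: suf) = [c] ++ suf by rfl, ← List.append_assoc,
      List.take_append_of_le_length (by simp)]
    simp
  rw [htake, hw_ofList_snoc_not_mem hpre, hw_idx_fo suf hpre]
  simp

-- A's loop, processed prefix p already folded in: the emitted list is the closed formula over the rest
lemma hw_A_main : ∀ (rest p : List Char) (out : List String),
    (rest.foldl hwStepA (PySem.Set.ofList p, ((PySem.Set.ofList p).length : Int), out)).2.2
      = out ++ rest.map (fun c =>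
          PySem.Int.toStr (((PySem.List.index? (PySem.Set.ofList (p ++ rest)) c).getD 0 : Int) + 1)) := by
  intro rest
  induction rest with
  | nil => intro p out; simp
  | cons c rest ih =>
    intro p out
    simp only [List.foldl_cons]
    by_cases hc : c ∈ p
    · have hm : c ∈ PySem.Set.ofList p := by rw [PySem.Set.mem_ofList]; exact hc
      have hstep : hwStepA (PySem.Set.ofList p, ((PySem.Set.ofList p).length : Int), out) c
          = (PySem.Set.ofList p, ((PySem.Set.ofList p).length : Int),
             out ++ [PySem.Int.toStr (((PySem.List.index? (PySem.Set.ofList p) c).getD 0 : Int) + 1)]) := by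
        simp [hwStepA, hm]
      rw [hstep]
      have hre : PySem.Set.ofList p = PySem.Set.ofList (p ++ [c]) := (hw_ofList_snoc_mem hc).symm
      rw [hre, ih (p ++ [c])]
      have hfix : PySem.List.index? (PySem.Set.ofList (p ++ c :: rest)) c
          = PySem.List.index? (PySem.Set.ofList p) c := hw_idx_fo_of_mem (c :: rest) hm
      have hfix' : List.idxOf? c (PySem.Set.ofList (p ++ c :: rest))
          = List.idxOf? c (PySem.Set.ofList p) := by
        simpa [PySem.List.index?_eq_idxOf?] using hfix
      simp [← hre, hfix']
    · have hm : c ∉ PySem.Set.ofList p := by rw [PySem.Set.mem_ofList]; exact hc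
      have hstep : hwStepA (PySem.Set.ofList p, ((PySem.Set.ofList p).length : Int), out) c
          = (PySem.Set.ofList p ++ [c], ((PySem.Set.ofList p).length : Int) + 1,
             out ++ [PySem.Int.toStr (((PySem.Set.ofList p).length : Int) + 1)]) := by
        simp [hwStepA, hm]
      rw [hstep]
      have hre : PySem.Set.ofList p ++ [c] = PySem.Set.ofList (p ++ [c]) := (hw_ofList_snoc_not_mem hc).symm
      have hlen : ((PySem.Set.ofList p).length : Int) + 1 = ((PySem.Set.ofList (p ++ [c])).length : Int) := by
        rw [← hre]; simp
      rw [hre, hlen, ih (p ++ [c])]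
      have hhead' : List.idxOf? c (PySem.Set.ofList (p ++ c :: rest))
          = some (PySem.Set.ofList p).length := by
        simpa [PySem.List.index?_eq_idxOf?] using hw_idx_fo rest hc
      simp [hhead', ← hre]

-- the B dict: looked up at a key of the fold list it returns the formula's value
lemma hw_getD_build (wl : List Char) : ∀ (l : List Char) (d : PySem.Dict Char Int) (c : Char),
    ((l.foldl (fun d x => d.insert x (hwVal wl x)) d).get? c)
      = if c ∈ l then some (hwVal wl c) else d.get? c := by
  intro l
  induction l with
  | nil => intro d c; simp
  | cons x l ih =>
    intro d c
    simp only [List.foldl_cons]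
    rw [ih]
    by_cases hcl : c ∈ l
    · simp [hcl]
    · by_cases hcx : c = x
      · subst hcx
        simp [hcl, PySem.Dict.get?_insert_self]
      · simp [hcl, hcx, PySem.Dict.get?_insert_of_ne _ _ hcx]

-- ===== VERDICT (by name: the statement is the Claim_ definition above) =====
theorem hashWord_spec : Claim_equal_hashWord := by
  intro word _
  unfold Spec_hashWord hashWord hashWord_alt
  have hA : (word.toList.foldl hwStepA ([], 0, [])).2.2
      = word.toList.map (fun c =>
          PySem.Int.toStr (((PySem.List.index? (PySem.Set.ofList word.toList) c).getD 0 : Int) + 1)) := by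
    simpa using hw_A_main word.toList [] []
  rw [hA]
  congr 1
  apply List.map_congr_left
  intro c hcmem
  have hset : c ∈ PySem.Set.ofList word.toList := by rw [PySem.Set.mem_ofList]; exact hcmem
  rw [PySem.Dict.getD_eq_get?_getD, hw_getD_build word.toList _ PySem.Dict.empty c]
  simp only [hset, if_pos]
  rw [Option.getD_some, hw_val_eq hcmem]
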